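-- pv_equiv track=rewrite | github.com/bssrdf/pyleet | C/CheckifThereisaPathWithEqualNumberof0sAnd1s.py | isThereAPath2
-- ===== SOURCE A (Python) =====
-- from typing import List
--
-- def isThereAPath2(grid: List[List[int]]) -> bool:
--     m, n = len(grid), len(grid[0])
--     s = m + n - 1
--     if s & 1: return False
--     s >>= 1
--     dp = [[set() for _ in range(n)] for _ in range(m)]
--     dp[0][0].add(-1 if grid[0][0] == 0 else 1)
--     for i in range(m):
--         for j in range(n):
--             if i == 0 and j == 0: continue
--             if j > 0:
--                 for x in dp[i][j-1]:
--                     k = x + (-1 if grid[i][j] == 0 else 1)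
--                     if k > s or k < -s : continue
--                     dp[i][j].add(k)
--             if i > 0:
--                 for x in dp[i-1][j]:
--                     k = x + (-1 if grid[i][j] == 0 else 1)
--                     if k > s or k < -s : continue
--                     dp[i][j].add(k)
--     return 0 in dp[m-1][n-1]
-- ===== SOURCE B (Python) =====
-- from typing import List
--
-- def isThereAPath2(grid: List[List[int]]) -> bool:
--     # Instead of the full set of reachable balances per cell, track only the min and
--     # max number of nonzero cells over all monotone paths to each cell; the reachable
--     # counts form a contiguous interval, so a balanced path exists iff the target
--     # count (m+n-1)//2 lies between them.
--     m, n = len(grid), len(grid[0])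
--     total = m + n - 1
--     if total % 2 == 1:
--         return False
--     target = total // 2  # number of nonzero cells a balanced path must contain
--     lo, hi = [], []
--     for i in range(m):
--         nlo, nhi = [], []
--         for j in range(n):
--             c = 0 if grid[i][j] == 0 else 1
--             if i == 0 and j == 0:
--                 a, b = c, c
--             elif i == 0:
--                 a, b = nlo[j-1] + c, nhi[j-1] + c
--             elif j == 0:
--                 a, b = lo[j] + c, hi[j] + c
--             else:
--                 a, b = min(nlo[j-1], lo[j]) + c, max(nhi[j-1], hi[j]) + c
--             nlo.append(a)
--             nhi.append(b)
--         lo, hi = nlo, nhi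
--     return lo[n-1] <= target <= hi[n-1]
-- ===== Notes on version B (the rewrite author's own statement) =====
-- stated objective: alternative
-- what changed: Replaces the per-cell set of all reachable 0/1-balances (each set iterated and rebuilt for every cell) by a two-row DP that keeps only the minimum and maximum count of nonzero cells over paths to each cell, using the fact that the reachable counts form a contiguous interval, and finally checks whether the target count (m+n-1)//2 lies in that interval.
-- outside the precondition, e.g. on isThereAPath2([[122, 65536], [2, 2147483647, 2], [-3]]): A returns False, B raises IndexError
import Mathlib
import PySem

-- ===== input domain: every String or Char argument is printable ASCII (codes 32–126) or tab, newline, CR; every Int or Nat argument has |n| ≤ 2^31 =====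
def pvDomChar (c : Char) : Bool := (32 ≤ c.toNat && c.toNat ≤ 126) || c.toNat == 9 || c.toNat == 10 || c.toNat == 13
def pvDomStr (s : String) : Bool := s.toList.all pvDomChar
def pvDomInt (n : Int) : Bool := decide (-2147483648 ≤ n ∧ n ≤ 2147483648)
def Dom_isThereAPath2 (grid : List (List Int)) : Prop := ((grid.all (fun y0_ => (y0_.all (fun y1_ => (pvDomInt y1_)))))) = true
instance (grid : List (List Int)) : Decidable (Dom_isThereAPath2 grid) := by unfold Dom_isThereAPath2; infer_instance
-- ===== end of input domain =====

-- B replaces A's per-cell sets of reachable balances by a two-row DP keeping only the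
-- min and max count of nonzero cells per cell; return values agree on Pre_.

-- shared trivial accessor: grid[i][j] (the default 0 is unreachable under Pre_,
-- where Python would raise IndexError instead)
def pvGv (grid : List (List Int)) (i j : Int) : Int :=
  match PySem.List.pyGet? grid i with
  | some row =>
    match PySem.List.pyGet? row j with
    | some v => v
    | none => 0
  | none => 0

-- ===== PORT A =====
-- -1 if grid[i][j] == 0 else 1
def pvC (grid : List (List Int)) (i j : Int) : Int :=
  if pvGv grid i j = 0 then -1 else 1

-- for x in src: k = x + c; if k > s or k < -s: continue; st.add(k)
def pvAddClipped (s c : Int) (src : PySem.Set Int) (st : PySem.Set Int) : PySem.Set Int :=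
  src.foldl (fun st x =>
    let k := x + c
    if k > s ∨ k < -s then st else PySem.Set.add st k) st

def pvGet2 (dp : List (List (PySem.Set Int))) (i j : Int) : PySem.Set Int :=
  PySem.List.pyGetD (PySem.List.pyGetD dp i []) j []

def pvSet2 (dp : List (List (PySem.Set Int))) (i j : Int) (v : PySem.Set Int) :
    List (List (PySem.Set Int)) :=
  PySem.List.pySetD dp i (PySem.List.pySetD (PySem.List.pyGetD dp i []) j v)

-- the body of A's double loop at one cell (i, j)
def pvStepA (grid : List (List Int)) (s : Int) (dp : List (List (PySem.Set Int)))
    (i j : Int) : List (List (PySem.Set Int)) :=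
  if i = 0 ∧ j = 0 then dp
  else
    let c := pvC grid i j
    let cur0 := pvGet2 dp i j
    let cur1 := if 0 < j then pvAddClipped s c (pvGet2 dp i (j - 1)) cur0 else cur0
    let cur2 := if 0 < i then pvAddClipped s c (pvGet2 dp (i - 1) j) cur1 else cur1
    pvSet2 dp i j cur2

def isThereAPath2 (grid : List (List Int)) : Bool :=
  match PySem.List.pyGet? grid 0 with
  | none => false   -- Python: len(grid[0]) raises IndexError; outside Pre_
  | some row0 =>
    let m : Int := (grid.length : Int)
    let n : Int := (row0.length : Int)
    let s0 : Int := m + n - 1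
    if PySem.Int.band s0 1 ≠ 0 then false
    else
      let s : Int := s0 >>> (1 : Nat)
      let dp0 : List (List (PySem.Set Int)) :=
        List.replicate grid.length (List.replicate row0.length (PySem.Set.empty : PySem.Set Int))
      let dp1 := pvSet2 dp0 0 0 (PySem.Set.add (pvGet2 dp0 0 0) (pvC grid 0 0))
      let dp2 := (PySem.List.pyRange 0 m 1).foldl
        (fun dp i => (PySem.List.pyRange 0 n 1).foldl
          (fun dp j => pvStepA grid s dp i j) dp) dp1
      PySem.Set.contains (pvGet2 dp2 (m - 1) (n - 1)) 0

-- ===== PORT B =====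
-- 0 if grid[i][j] == 0 else 1
def pvOnes (grid : List (List Int)) (i j : Int) : Int :=
  if pvGv grid i j = 0 then 0 else 1

-- the body of B's inner loop: q = (nlo, nhi) so far, p = (lo, hi) of the previous row
def pvStepB (grid : List (List Int)) (p q : List Int × List Int) (i j : Int) :
    List Int × List Int :=
  let c := pvOnes grid i j
  let ab : Int × Int :=
    if i = 0 ∧ j = 0 then (c, c)
    else if i = 0 then
      (PySem.List.pyGetD q.1 (j - 1) 0 + c, PySem.List.pyGetD q.2 (j - 1) 0 + c)
    else if j = 0 then
      (PySem.List.pyGetD p.1 j 0 + c, PySem.List.pyGetD p.2 j 0 + c)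
    else
      (min (PySem.List.pyGetD q.1 (j - 1) 0) (PySem.List.pyGetD p.1 j 0) + c,
       max (PySem.List.pyGetD q.2 (j - 1) 0) (PySem.List.pyGetD p.2 j 0) + c)
  (q.1 ++ [ab.1], q.2 ++ [ab.2])

def isThereAPath2_alt (grid : List (List Int)) : Bool :=
  match PySem.List.pyGet? grid 0 with
  | none => false   -- Python: len(grid[0]) raises IndexError; outside Pre_
  | some row0 =>
    let m : Int := (grid.length : Int)
    let n : Int := (row0.length : Int)
    let total : Int := m + n - 1
    if PySem.Int.mod total 2 = 1 then false
    else
      let target : Int := PySem.Int.floordiv total 2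
      let p := (PySem.List.pyRange 0 m 1).foldl
        (fun (p : List Int × List Int) i =>
          (PySem.List.pyRange 0 n 1).foldl
            (fun (q : List Int × List Int) j => pvStepB grid p q i j) ([], []))
        ([], [])
      decide (PySem.List.pyGetD p.1 (n - 1) 0 ≤ target) &&
        decide (target ≤ PySem.List.pyGetD p.2 (n - 1) 0)

-- ===== PRECONDITION & SPEC =====
-- Pre_ excludes the inputs on which Python A raises IndexError — the empty grid and,
-- when m+n-1 is even so the DP runs, an empty first row or rows shorter than the first —
-- plus the ragged grids where A happens to return False only because its clipped
-- reachability sets die out before the missing cell is read, while B (reading every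
-- cell of the m x n rectangle) raises IndexError there.
def Pre_isThereAPath2 (grid : List (List Int)) : Prop :=
  grid ≠ [] ∧
  (PySem.Int.mod ((grid.length : Int) + ((grid.headD []).length : Int) - 1) 2 = 0 →
    0 < (grid.headD []).length ∧ ∀ row ∈ grid, (grid.headD []).length ≤ row.length)

instance (grid : List (List Int)) : Decidable (Pre_isThereAPath2 grid) := by
  unfold Pre_isThereAPath2; infer_instance

def pvWitness_isThereAPath2 : List (List Int) := [[0], [1]]

def Spec_isThereAPath2 (grid : List (List Int)) (out : Bool) : Prop := out = isThereAPath2_alt grid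
instance (grid : List (List Int)) (out : Bool) : Decidable (Spec_isThereAPath2 grid out) := by
  unfold Spec_isThereAPath2; infer_instance

-- ===== CLAIM (what is proved, stated in full; the proofs are below) =====
def Claim_equal_isThereAPath2 : Prop := ∀ (grid : List (List Int)), Dom_isThereAPath2 grid → Pre_isThereAPath2 grid → Spec_isThereAPath2 grid (isThereAPath2 grid)

-- ===== LEMMAS AND PROOFS =====

-- ---- spec-side recursive descriptions of the two DPs ----

-- the set A's dp table holds at cell (i, j)
def pvCellA (grid : List (List Int)) (s : Int) : Nat → Nat → PySem.Set Int
  | 0, 0 => PySem.Set.add PySem.Set.empty (pvC grid 0 0)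
  | 0, j + 1 =>
      pvAddClipped s (pvC grid 0 ((j + 1 : Nat) : Int)) (pvCellA grid s 0 j) PySem.Set.empty
  | i + 1, 0 =>
      pvAddClipped s (pvC grid ((i + 1 : Nat) : Int) 0) (pvCellA grid s i 0) PySem.Set.empty
  | i + 1, j + 1 =>
      pvAddClipped s (pvC grid ((i + 1 : Nat) : Int) ((j + 1 : Nat) : Int))
        (pvCellA grid s i (j + 1))
        (pvAddClipped s (pvC grid ((i + 1 : Nat) : Int) ((j + 1 : Nat) : Int))
          (pvCellA grid s (i + 1) j) PySem.Set.empty)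
  termination_by i j => (i, j)

-- min / max number of nonzero cells over monotone paths, B's row entries
def pvLoC (grid : List (List Int)) : Nat → Nat → Int
  | 0, 0 => pvOnes grid 0 0
  | 0, j + 1 => pvLoC grid 0 j + pvOnes grid 0 ((j + 1 : Nat) : Int)
  | i + 1, 0 => pvLoC grid i 0 + pvOnes grid ((i + 1 : Nat) : Int) 0
  | i + 1, j + 1 =>
      min (pvLoC grid i (j + 1)) (pvLoC grid (i + 1) j) +
        pvOnes grid ((i + 1 : Nat) : Int) ((j + 1 : Nat) : Int)
  termination_by i j => (i, j)

def pvHiC (grid : List (List Int)) : Nat → Nat → Int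
  | 0, 0 => pvOnes grid 0 0
  | 0, j + 1 => pvHiC grid 0 j + pvOnes grid 0 ((j + 1 : Nat) : Int)
  | i + 1, 0 => pvHiC grid i 0 + pvOnes grid ((i + 1 : Nat) : Int) 0
  | i + 1, j + 1 =>
      max (pvHiC grid i (j + 1)) (pvHiC grid (i + 1) j) +
        pvOnes grid ((i + 1 : Nat) : Int) ((j + 1 : Nat) : Int)
  termination_by i j => (i, j)

-- balances (#nonzero - #zero) reachable at (i, j) by a monotone path, no clipping
inductive pvReach (grid : List (List Int)) : Nat → Nat → Int → Prop
  | base : pvReach grid 0 0 (pvC grid 0 0)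
  | right {i j : Nat} {x : Int} : pvReach grid i j x →
      pvReach grid i (j + 1) (x + pvC grid (i : Int) ((j + 1 : Nat) : Int))
  | down {i j : Nat} {x : Int} : pvReach grid i j x →
      pvReach grid (i + 1) j (x + pvC grid ((i + 1 : Nat) : Int) (j : Int))

-- ---- small facts ----

lemma pvC_cases (grid : List (List Int)) (i j : Int) : pvC grid i j = -1 ∨ pvC grid i j = 1 := by
  unfold pvC; split <;> simp

lemma pvC_eq_ones (grid : List (List Int)) (i j : Int) :
    pvC grid i j = 2 * pvOnes grid i j - 1 := by
  unfold pvC pvOnes; split <;> simp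

lemma mem_pvAddClipped (s c : Int) (src st : PySem.Set Int) (y : Int) :
    y ∈ pvAddClipped s c src st ↔
      y ∈ st ∨ ∃ x ∈ src, y = x + c ∧ ¬(x + c > s ∨ x + c < -s) := by
  induction src generalizing st with
  | nil => simp [pvAddClipped]
  | cons a as ih =>
    simp only [pvAddClipped, List.foldl_cons] at *
    rw [ih]
    by_cases h : a + c > s ∨ a + c < -s
    · simp only [h, if_pos]
      constructor
      · rintro (hy | hx)
        · exact Or.inl hy
        · exact Or.inr (by rcases hx with ⟨x, hx1, hx2⟩; exact ⟨x, List.mem_cons_of_mem _ hx1, hx2⟩)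
      · rintro (hy | ⟨x, hx1, hx2, hx3⟩)
        · exact Or.inl hy
        · rcases List.mem_cons.mp hx1 with rfl | hx1
          · exact absurd h hx3
          · exact Or.inr ⟨x, hx1, hx2, hx3⟩
    · simp only [h, if_neg, not_false_iff, PySem.Set.mem_add]
      constructor
      · rintro ((hy | rfl) | hx)
        · exact Or.inl hy
        · exact Or.inr ⟨a, List.mem_cons_self .., ⟨rfl, h⟩⟩
        · rcases hx with ⟨x, hx1, hx2⟩; exact Or.inr ⟨x, List.mem_cons_of_mem _ hx1, hx2⟩
      · rintro (hy | ⟨x, hx1, hx2, hx3⟩)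
        · exact Or.inl (Or.inl hy)
        · rcases List.mem_cons.mp hx1 with rfl | hx1
          · exact Or.inl (Or.inr hx2)
          · exact Or.inr ⟨x, hx1, hx2, hx3⟩

-- ---- table lemmas for port A ----

lemma getD_set' {α : Type} [Inhabited α] (xs : List α) (a i : Nat) (v d : α) :
    (xs.set a v).getD i d = if i = a ∧ a < xs.length then v else xs.getD i d := by
  rcases Nat.lt_or_ge i xs.length with h | h
  · rw [List.getD_eq_getElem _ _ (by simpa using h), List.getElem_set]
    by_cases hia : i = a
    · subst hia; simp [h]
    · rw [if_neg (by omega), List.getD_eq_getElem _ _ h]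
      simp [hia]
  · have h1 : xs.getD i d = d := List.getD_eq_default _ _ (by simpa using h)
    have h2 : (xs.set a v).getD i d = d := List.getD_eq_default _ _ (by simpa using h)
    rw [h1, h2]
    have : ¬(i = a ∧ a < xs.length) := by rintro ⟨rfl, hh⟩; omega
    simp [this]

lemma pvGet2_natCast' (dp : List (List (PySem.Set Int))) (i j : Nat) :
    pvGet2 dp (i : Int) (j : Int) = (dp.getD i []).getD j [] := by
  simp [pvGet2]

lemma pvSet2_natCast (dp : List (List (PySem.Set Int))) (a b : Nat) (v : PySem.Set Int) :
    pvSet2 dp (a : Int) (b : Int) v = dp.set a ((dp.getD a []).set b v) := by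
  simp [pvSet2]

lemma pvGet2_pvSet2 (dp : List (List (PySem.Set Int))) (a b : Nat) (v : PySem.Set Int)
    (ha : a < dp.length) (hb : b < (dp.getD a []).length) (i j : Nat) :
    pvGet2 (pvSet2 dp (a : Int) (b : Int) v) (i : Int) (j : Int) =
      if i = a ∧ j = b then v else pvGet2 dp (i : Int) (j : Int) := by
  rw [pvSet2_natCast, pvGet2_natCast', pvGet2_natCast', getD_set']
  by_cases hia : i = a
  · subst hia
    rw [if_pos ⟨rfl, ha⟩, getD_set']
    by_cases hjb : j = b
    · subst hjb
      rw [if_pos ⟨rfl, hb⟩, if_pos ⟨rfl, rfl⟩]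
    · rw [if_neg (by tauto), if_neg (by tauto)]
  · rw [if_neg (by tauto), if_neg (by tauto)]

def pvGoodA (grid : List (List Int)) (s : Int) (m n : Nat)
    (dp : List (List (PySem.Set Int))) (i0 j0 : Nat) : Prop :=
  dp.length = m ∧ (∀ r ∈ dp, r.length = n) ∧
  ∀ a b : Nat, a < m → b < n →
    pvGet2 dp (a : Int) (b : Int) =
      if (a < i0 ∨ (a = i0 ∧ b < j0)) ∨ (a = 0 ∧ b = 0) then pvCellA grid s a b
      else PySem.Set.empty

lemma pvRowLen {m n : Nat} {dp : List (List (PySem.Set Int))}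
    (hlen : dp.length = m) (hrows : ∀ r ∈ dp, r.length = n) {a : Nat} (ha : a < m) :
    (dp.getD a []).length = n := by
  rw [List.getD_eq_getElem _ _ (by omega)]
  exact hrows _ (List.getElem_mem _)

lemma pvSet2_good (grid : List (List Int)) (s : Int) (m n : Nat)
    (dp : List (List (PySem.Set Int))) (i0 j0 : Nat)
    (hi : i0 < m) (hj : j0 < n) (h : pvGoodA grid s m n dp i0 j0)
    (v : PySem.Set Int) (hv : v = pvCellA grid s i0 j0) :
    pvGoodA grid s m n (pvSet2 dp (i0 : Int) (j0 : Int) v) i0 (j0 + 1) := by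
  obtain ⟨hlen, hrows, hcell⟩ := h
  have ha : i0 < dp.length := by omega
  have hb : j0 < (dp.getD i0 []).length := by rw [pvRowLen hlen hrows hi]; omega
  refine ⟨?_, ?_, ?_⟩
  · rw [pvSet2_natCast]; simpa using hlen
  · intro r hr
    rw [pvSet2_natCast] at hr
    rcases List.mem_or_eq_of_mem_set hr with hr | rfl
    · exact hrows _ hr
    · rw [List.length_set]; exact pvRowLen hlen hrows hi
  · intro a b hA hB
    rw [pvGet2_pvSet2 dp i0 j0 v ha hb]
    by_cases hab : a = i0 ∧ b = j0
    · obtain ⟨rfl, rfl⟩ := hab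
      rw [if_pos ⟨rfl, rfl⟩, if_pos (by omega), hv]
    · rw [if_neg hab, hcell a b hA hB]
      apply if_congr _ rfl rfl
      constructor <;> intro hx <;> [skip; skip] <;> omega

lemma pvStepA_good (grid : List (List Int)) (s : Int) (m n : Nat)
    (dp : List (List (PySem.Set Int))) (i0 j0 : Nat)
    (hi : i0 < m) (hj : j0 < n)
    (h : pvGoodA grid s m n dp i0 j0) :
    pvGoodA grid s m n (pvStepA grid s dp (i0 : Int) (j0 : Int)) i0 (j0 + 1) := by
  obtain ⟨hlen, hrows, hcell⟩ := h
  by_cases h00 : i0 = 0 ∧ j0 = 0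
  · obtain ⟨rfl, rfl⟩ := h00
    have hstep : pvStepA grid s dp ((0 : Nat) : Int) ((0 : Nat) : Int) = dp := by
      unfold pvStepA
      rw [if_pos (by norm_num)]
    rw [hstep]
    refine ⟨hlen, hrows, fun a b ha hb => ?_⟩
    rw [hcell a b ha hb]
    apply if_congr _ rfl rfl
    constructor <;> intro hx <;> omega
  · have hcur0 : pvGet2 dp (i0 : Int) (j0 : Int) = PySem.Set.empty := by
      rw [hcell i0 j0 hi hj, if_neg (by omega)]
    have hstep : pvStepA grid s dp (i0 : Int) (j0 : Int) =
        pvSet2 dp (i0 : Int) (j0 : Int)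
          (if 0 < (i0 : Int) then
            pvAddClipped s (pvC grid (i0 : Int) (j0 : Int))
              (pvGet2 dp ((i0 : Int) - 1) (j0 : Int))
              (if 0 < (j0 : Int) then
                pvAddClipped s (pvC grid (i0 : Int) (j0 : Int))
                  (pvGet2 dp (i0 : Int) ((j0 : Int) - 1)) PySem.Set.empty
               else PySem.Set.empty)
           else
            (if 0 < (j0 : Int) then
              pvAddClipped s (pvC grid (i0 : Int) (j0 : Int))
                (pvGet2 dp (i0 : Int) ((j0 : Int) - 1)) PySem.Set.empty
             else PySem.Set.empty)) := by
      unfold pvStepA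
      rw [if_neg (by omega), hcur0]
    rw [hstep]
    apply pvSet2_good grid s m n dp i0 j0 hi hj ⟨hlen, hrows, hcell⟩
    rcases Nat.eq_zero_or_pos i0 with rfl | hi0
    · obtain ⟨j1, rfl⟩ : ∃ j1, j0 = j1 + 1 := ⟨j0 - 1, by omega⟩
      rw [if_neg (show ¬(0 : Int) < ((0 : Nat) : Int) by simp),
        if_pos (show (0 : Int) < ((j1 + 1 : Nat) : Int) by push_cast; omega)]
      have hj1 : ((j1 + 1 : Nat) : Int) - 1 = ((j1 : Nat) : Int) := by push_cast; ring
      rw [hj1, hcell 0 j1 hi (by omega), if_pos (by omega)]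
      simp only [pvCellA, Nat.cast_zero]
    · rcases Nat.eq_zero_or_pos j0 with rfl | hj0
      · obtain ⟨i1, rfl⟩ : ∃ i1, i0 = i1 + 1 := ⟨i0 - 1, by omega⟩
        rw [if_pos (show (0 : Int) < ((i1 + 1 : Nat) : Int) by push_cast; omega),
          if_neg (show ¬(0 : Int) < ((0 : Nat) : Int) by simp)]
        have hi1 : ((i1 + 1 : Nat) : Int) - 1 = ((i1 : Nat) : Int) := by push_cast; ring
        rw [hi1, hcell i1 0 (by omega) hj, if_pos (by omega)]
        simp only [pvCellA, Nat.cast_zero]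
      · obtain ⟨i1, rfl⟩ : ∃ i1, i0 = i1 + 1 := ⟨i0 - 1, by omega⟩
        obtain ⟨j1, rfl⟩ : ∃ j1, j0 = j1 + 1 := ⟨j0 - 1, by omega⟩
        rw [if_pos (show (0 : Int) < ((i1 + 1 : Nat) : Int) by push_cast; omega),
          if_pos (show (0 : Int) < ((j1 + 1 : Nat) : Int) by push_cast; omega)]
        have hi1 : ((i1 + 1 : Nat) : Int) - 1 = ((i1 : Nat) : Int) := by push_cast; ring
        have hj1 : ((j1 + 1 : Nat) : Int) - 1 = ((j1 : Nat) : Int) := by push_cast; ring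
        rw [hi1, hj1, hcell (i1 + 1) j1 hi (by omega), hcell i1 (j1 + 1) (by omega) hj,
          if_pos (by omega), if_pos (by omega)]
        simp only [pvCellA]

lemma pvRowA_good (grid : List (List Int)) (s : Int) (m n : Nat)
    (dp : List (List (PySem.Set Int))) (i : Nat) (hi : i < m) :
    ∀ j0, j0 ≤ n → pvGoodA grid s m n dp i 0 →
      pvGoodA grid s m n
        ((PySem.List.pyRange 0 (j0 : Int) 1).foldl
          (fun dp j => pvStepA grid s dp (i : Int) j) dp) i j0 := by
  intro j0
  induction j0 with
  | zero =>
    intro _ h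
    simp only [Nat.cast_zero, PySem.List.pyRange_zero]
    exact h
  | succ j0 ih =>
    intro hle h
    rw [show ((j0 + 1 : Nat) : Int) = (j0 : Int) + 1 by push_cast; ring,
      PySem.List.pyRange_one_succ_right (by positivity), List.foldl_append]
    simp only [List.foldl_cons, List.foldl_nil]
    exact pvStepA_good grid s m n _ i j0 hi (by omega) (ih (by omega) h)

lemma pvGoodA_rollover (grid : List (List Int)) (s : Int) (m n : Nat)
    (dp : List (List (PySem.Set Int))) (i0 : Nat)
    (h : pvGoodA grid s m n dp i0 n) : pvGoodA grid s m n dp (i0 + 1) 0 := by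
  obtain ⟨hlen, hrows, hcell⟩ := h
  refine ⟨hlen, hrows, fun a b ha hb => ?_⟩
  rw [hcell a b ha hb]
  apply if_congr _ rfl rfl
  constructor <;> intro hx <;> omega

lemma pvTblA_good (grid : List (List Int)) (s : Int) (m n : Nat)
    (dp : List (List (PySem.Set Int))) :
    ∀ i0, i0 ≤ m → pvGoodA grid s m n dp 0 0 →
      pvGoodA grid s m n
        ((PySem.List.pyRange 0 (i0 : Int) 1).foldl
          (fun dp i => (PySem.List.pyRange 0 (n : Int) 1).foldl
            (fun dp j => pvStepA grid s dp i j) dp) dp) i0 0 := by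
  intro i0
  induction i0 with
  | zero =>
    intro _ h
    simp only [Nat.cast_zero, PySem.List.pyRange_zero]
    exact h
  | succ i0 ih =>
    intro hle h
    rw [show ((i0 + 1 : Nat) : Int) = (i0 : Int) + 1 by push_cast; ring,
      PySem.List.pyRange_one_succ_right (by positivity), List.foldl_append]
    simp only [List.foldl_cons, List.foldl_nil]
    exact pvGoodA_rollover grid s m n _ i0
      (pvRowA_good grid s m n _ i0 (by omega) n le_rfl (ih (by omega) h))

lemma pvA_eval (r0 : List Int) (rest : List (List Int)) (s : Int)
    (hn : 0 < r0.length)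
    (heven : ¬ PySem.Int.band ((((r0 :: rest : List (List Int)).length : Int)) + (r0.length : Int) - 1) 1 ≠ 0)
    (hs : s = (((r0 :: rest : List (List Int)).length : Int) + (r0.length : Int) - 1) >>> (1 : Nat)) :
    isThereAPath2 (r0 :: rest) =
      PySem.Set.contains
        (pvCellA (r0 :: rest) s ((r0 :: rest : List (List Int)).length - 1) (r0.length - 1)) 0 := by
  have h0 : PySem.List.pyGet? (r0 :: rest) (0 : Int) = some r0 := by
    simp [PySem.List.pyGet?, PySem.List.pyIdx?]
  have hm : 0 < (r0 :: rest : List (List Int)).length := by simp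
  set grid : List (List Int) := r0 :: rest with hgrid
  set m : Nat := grid.length with hmdef
  set n : Nat := r0.length with hndef
  -- the freshly initialised table is good at stage (0, 0)
  have hrepl : ∀ a : Nat, a < m →
      (List.replicate m (List.replicate n (PySem.Set.empty : PySem.Set Int))).getD a []
        = List.replicate n (PySem.Set.empty : PySem.Set Int) := by
    intro a ha
    rw [List.getD_eq_getElem _ _ (by simpa using ha)]
    exact List.getElem_replicate ..
  have hreplb : ∀ b : Nat, b < n →
      (List.replicate n (PySem.Set.empty : PySem.Set Int)).getD b [] = PySem.Set.empty := by
    intro b hb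
    rw [List.getD_eq_getElem _ _ (by simpa using hb)]
    exact List.getElem_replicate ..
  have hdp00 : pvGet2 (List.replicate m (List.replicate n (PySem.Set.empty : PySem.Set Int)))
      (0 : Int) (0 : Int) = PySem.Set.empty := by
    rw [show (0 : Int) = ((0 : Nat) : Int) by simp, pvGet2_natCast', hrepl 0 hm, hreplb 0 hn]
  have hG : pvGoodA grid s m n
      (pvSet2 (List.replicate m (List.replicate n (PySem.Set.empty : PySem.Set Int))) 0 0
        (PySem.Set.add
          (pvGet2 (List.replicate m (List.replicate n (PySem.Set.empty : PySem.Set Int))) 0 0)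
          (pvC grid 0 0))) 0 0 := by
    rw [hdp00]
    rw [show (0 : Int) = ((0 : Nat) : Int) by simp]
    have hget0 := hrepl 0 hm
    refine ⟨?_, ?_, ?_⟩
    · rw [pvSet2_natCast]; simp
    · intro r hr
      rw [pvSet2_natCast] at hr
      rcases List.mem_or_eq_of_mem_set hr with hr | rfl
      · rw [List.eq_of_mem_replicate hr]; simp
      · rw [List.length_set, hget0]; simp
    · intro a b ha hb
      rw [pvGet2_pvSet2 _ 0 0 _ (by simpa using hm) (by rw [hget0]; simpa using hn)]
      by_cases hab : a = 0 ∧ b = 0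
      · obtain ⟨rfl, rfl⟩ := hab
        rw [if_pos ⟨rfl, rfl⟩, if_pos (by omega)]
        simp only [pvCellA, Nat.cast_zero]
      · rw [if_neg hab, if_neg (by omega), pvGet2_natCast', hrepl a ha, hreplb b hb]
  have hfold := pvTblA_good grid s m n _ m le_rfl hG
  obtain ⟨-, -, hcell⟩ := hfold
  have hmn : ((m : Int) - 1) = ((m - 1 : Nat) : Int) := by push_cast [hmdef]; omega
  have hnn : ((n : Int) - 1) = ((n - 1 : Nat) : Int) := by push_cast [hndef]; omega
  have hfin := hcell (m - 1) (n - 1) (by omega) (by omega)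
  rw [if_pos (by omega)] at hfin
  -- now evaluate the port
  show (match PySem.List.pyGet? grid (0 : Int) with
    | none => false
    | some row0 =>
      let mI : Int := (grid.length : Int)
      let nI : Int := (row0.length : Int)
      let s0 : Int := mI + nI - 1
      if PySem.Int.band s0 1 ≠ 0 then false
      else
        let s' : Int := s0 >>> (1 : Nat)
        let dp0 : List (List (PySem.Set Int)) :=
          List.replicate grid.length (List.replicate row0.length (PySem.Set.empty : PySem.Set Int))
        let dp1 := pvSet2 dp0 0 0 (PySem.Set.add (pvGet2 dp0 0 0) (pvC grid 0 0))
        let dp2 := (PySem.List.pyRange 0 mI 1).foldl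
          (fun dp i => (PySem.List.pyRange 0 nI 1).foldl
            (fun dp j => pvStepA grid s' dp i j) dp) dp1
        PySem.Set.contains (pvGet2 dp2 (mI - 1) (nI - 1)) 0) = _
  rw [h0]
  simp only
  rw [if_neg heven, ← hs, hmn, hnn, hfin]
-- ---- row lemmas for port B ----

lemma pvRowB (grid : List (List Int)) (n : Nat) (i : Nat)
    (p : List Int × List Int)
    (hp : 0 < i → p = ((List.range n).map (fun j => pvLoC grid (i - 1) j),
                       (List.range n).map (fun j => pvHiC grid (i - 1) j))) :
    ∀ j0, j0 ≤ n →
      (PySem.List.pyRange 0 (j0 : Int) 1).foldl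
          (fun q j => pvStepB grid p q (i : Int) j) ([], []) =
        ((List.range j0).map (fun j => pvLoC grid i j),
         (List.range j0).map (fun j => pvHiC grid i j)) := by
  intro j0
  induction j0 with
  | zero => intro _; simp
  | succ j0 ih =>
    intro hle
    rw [show ((j0 + 1 : Nat) : Int) = (j0 : Int) + 1 by push_cast; ring,
      PySem.List.pyRange_one_succ_right (by positivity), List.foldl_append]
    rw [ih (by omega)]
    simp only [List.foldl_cons, List.foldl_nil]
    rcases Nat.eq_zero_or_pos i with rfl | hi0
    · rcases Nat.eq_zero_or_pos j0 with rfl | hj0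
      · -- (0, 0)
        simp only [pvStepB]
        rw [if_pos (show ((0 : Nat) : Int) = 0 ∧ ((0 : Nat) : Int) = 0 from ⟨by simp, by simp⟩)]
        simp [pvLoC, pvHiC]
      · -- (0, j0), j0 > 0
        obtain ⟨j1, rfl⟩ : ∃ j1, j0 = j1 + 1 := ⟨j0 - 1, by omega⟩
        simp only [pvStepB]
        rw [if_neg (show ¬(((0 : Nat) : Int) = 0 ∧ ((j1 + 1 : Nat) : Int) = 0) from by push_cast; omega),
          if_pos (show ((0 : Nat) : Int) = 0 from by simp)]
        rw [show ((j1 + 1 : Nat) : Int) - 1 = ((j1 : Nat) : Int) by push_cast; ring]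
        simp only [PySem.List.pyGetD_natCast,
          PySem.List.getD_map_range _ _ _ _ (by omega : j1 < j1 + 1)]
        simp only [Prod.mk.injEq]
        constructor
        · conv_rhs => rw [List.range_succ]
          simp only [List.map_append, List.map_cons, List.map_nil]
          congr 1
          simp only [pvLoC, Nat.cast_zero]
        · conv_rhs => rw [List.range_succ]
          simp only [List.map_append, List.map_cons, List.map_nil]
          congr 1
          simp only [pvHiC, Nat.cast_zero]
    · rcases Nat.eq_zero_or_pos j0 with rfl | hj0
      · -- (i, 0), i > 0
        obtain ⟨i1, rfl⟩ : ∃ i1, i = i1 + 1 := ⟨i - 1, by omega⟩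
        simp only [pvStepB]
        rw [if_neg (show ¬(((i1 + 1 : Nat) : Int) = 0 ∧ ((0 : Nat) : Int) = 0) from by push_cast; omega),
          if_neg (show ¬((i1 + 1 : Nat) : Int) = 0 from by push_cast; omega),
          if_pos (show ((0 : Nat) : Int) = 0 from by simp), hp (by omega)]
        simp only [Nat.add_sub_cancel]
        simp [pvLoC, pvHiC]
        constructor <;>
          rw [PySem.List.pyGetD_zero, PySem.List.getD_map_range _ _ _ _ (show 0 < n by omega)]
      · -- (i, j0), i > 0, j0 > 0
        obtain ⟨i1, rfl⟩ : ∃ i1, i = i1 + 1 := ⟨i - 1, by omega⟩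
        obtain ⟨j1, rfl⟩ : ∃ j1, j0 = j1 + 1 := ⟨j0 - 1, by omega⟩
        simp only [pvStepB]
        rw [if_neg (show ¬(((i1 + 1 : Nat) : Int) = 0 ∧ ((j1 + 1 : Nat) : Int) = 0) from by push_cast; omega),
          if_neg (show ¬((i1 + 1 : Nat) : Int) = 0 from by push_cast; omega),
          if_neg (show ¬((j1 + 1 : Nat) : Int) = 0 from by push_cast; omega), hp (by omega)]
        rw [show ((j1 + 1 : Nat) : Int) - 1 = ((j1 : Nat) : Int) by push_cast; ring]
        simp only [PySem.List.pyGetD_natCast, Nat.add_sub_cancel,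
          PySem.List.getD_map_range _ _ _ _ (by omega : j1 < j1 + 1),
          PySem.List.getD_map_range _ _ _ _ (by omega : j1 + 1 < n)]
        simp only [Prod.mk.injEq]
        constructor
        · conv_rhs => rw [List.range_succ]
          simp only [List.map_append, List.map_cons, List.map_nil]
          congr 1
          simp only [pvLoC]
          rw [min_comm]
        · conv_rhs => rw [List.range_succ]
          simp only [List.map_append, List.map_cons, List.map_nil]
          congr 1
          simp only [pvHiC]
          rw [max_comm]

lemma pvTblB (grid : List (List Int)) (m n : Nat) :
    ∀ i0, i0 ≤ m → 0 < i0 →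
      (PySem.List.pyRange 0 (i0 : Int) 1).foldl
          (fun p i => (PySem.List.pyRange 0 (n : Int) 1).foldl
            (fun q j => pvStepB grid p q i j) ([], [])) ([], []) =
        ((List.range n).map (fun j => pvLoC grid (i0 - 1) j),
         (List.range n).map (fun j => pvHiC grid (i0 - 1) j)) := by
  intro i0
  induction i0 with
  | zero => intro _ h; omega
  | succ i0 ih =>
    intro hle _
    rw [show ((i0 + 1 : Nat) : Int) = (i0 : Int) + 1 by push_cast; ring,
      PySem.List.pyRange_one_succ_right (by positivity), List.foldl_append]
    simp only [List.foldl_cons, List.foldl_nil]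
    rcases Nat.eq_zero_or_pos i0 with rfl | hi0
    · have hrow := pvRowB grid n 0 ([], []) (fun h => absurd h (by omega)) n le_rfl
      simp only [Nat.cast_zero, PySem.List.pyRange_zero, Int.toNat_zero, List.range_zero,
        List.map_nil, List.foldl_nil]
      simpa [PySem.List.pyRange_zero] using hrow
    · rw [ih (by omega) hi0]
      have := pvRowB grid n i0
        ((List.range n).map (fun j => pvLoC grid (i0 - 1) j),
         (List.range n).map (fun j => pvHiC grid (i0 - 1) j))
        (fun _ => rfl) n le_rfl
      rw [this]
      simp

lemma pvB_eval (r0 : List Int) (rest : List (List Int)) (t : Int)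
    (hn : 0 < r0.length)
    (heven : ¬ PySem.Int.mod ((((r0 :: rest : List (List Int)).length : Int)) + (r0.length : Int) - 1) 2 = 1)
    (ht : t = PySem.Int.floordiv (((r0 :: rest : List (List Int)).length : Int) + (r0.length : Int) - 1) 2) :
    isThereAPath2_alt (r0 :: rest) =
      (decide (pvLoC (r0 :: rest) ((r0 :: rest : List (List Int)).length - 1) (r0.length - 1) ≤ t) &&
       decide (t ≤ pvHiC (r0 :: rest) ((r0 :: rest : List (List Int)).length - 1) (r0.length - 1))) := by
  have h0 : PySem.List.pyGet? (r0 :: rest) (0 : Int) = some r0 := by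
    simp [PySem.List.pyGet?, PySem.List.pyIdx?]
  have hm : 0 < (r0 :: rest : List (List Int)).length := by simp
  set grid : List (List Int) := r0 :: rest with hgrid
  set m : Nat := grid.length with hmdef
  set n : Nat := r0.length with hndef
  have hfold := pvTblB grid m n m le_rfl hm
  have hnn : ((n : Int) - 1) = ((n - 1 : Nat) : Int) := by push_cast [hndef]; omega
  show (match PySem.List.pyGet? grid (0 : Int) with
    | none => false
    | some row0 =>
      let mI : Int := (grid.length : Int)
      let nI : Int := (row0.length : Int)
      let total : Int := mI + nI - 1
      if PySem.Int.mod total 2 = 1 then false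
      else
        let target : Int := PySem.Int.floordiv total 2
        let p := (PySem.List.pyRange 0 mI 1).foldl
          (fun (p : List Int × List Int) i =>
            (PySem.List.pyRange 0 nI 1).foldl
              (fun (q : List Int × List Int) j => pvStepB grid p q i j) ([], []))
          ([], [])
        decide (PySem.List.pyGetD p.1 (nI - 1) 0 ≤ target) &&
          decide (target ≤ PySem.List.pyGetD p.2 (nI - 1) 0)) = _
  rw [h0]
  simp only
  rw [if_neg heven, ← ht, hfold, hnn]
  simp only [PySem.List.pyGetD_natCast,
    PySem.List.getD_map_range _ _ _ _ (by omega : n - 1 < n)]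

-- ---- the mathematics: reachable balances form a parity interval, clipping is harmless ----

lemma pvReach_bounds {grid : List (List Int)} {i j : Nat} {k : Int}
    (h : pvReach grid i j k) :
    -((i : Int) + j + 1) ≤ k ∧ k ≤ (i : Int) + j + 1 ∧ (2 : Int) ∣ (k + i + j + 1) := by
  induction h with
  | base => rcases pvC_cases grid 0 0 with h | h <;> rw [h] <;> norm_num
  | right h ih =>
    rcases pvC_cases grid _ _ with h1 | h1 <;> rw [h1] <;> push_cast at * <;>
      exact ⟨by omega, by omega, by omega⟩
  | down h ih =>
    rcases pvC_cases grid _ _ with h1 | h1 <;> rw [h1] <;> push_cast at * <;>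
      exact ⟨by omega, by omega, by omega⟩

lemma pvReach_nonempty (grid : List (List Int)) : ∀ i j : Nat, ∃ k, pvReach grid i j k := by
  intro i
  induction i with
  | zero =>
    intro j
    induction j with
    | zero => exact ⟨_, pvReach.base⟩
    | succ j ih => rcases ih with ⟨k, hk⟩; exact ⟨_, hk.right⟩
  | succ i ih =>
    intro j
    rcases ih j with ⟨k, hk⟩
    exact ⟨_, hk.down⟩

lemma pvCellA_subset_reach (grid : List (List Int)) (s : Int) :
    ∀ i j : Nat, ∀ k : Int, k ∈ pvCellA grid s i j → pvReach grid i j k := by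
  intro i
  induction i with
  | zero =>
    intro j
    induction j with
    | zero =>
      intro k hk
      simp only [pvCellA, PySem.Set.mem_add, PySem.Set.empty, List.not_mem_nil, false_or] at hk
      exact hk ▸ pvReach.base
    | succ j ihj =>
      intro k hk
      simp only [pvCellA] at hk
      rw [mem_pvAddClipped] at hk
      simp only [PySem.Set.empty, List.not_mem_nil, false_or] at hk
      rcases hk with ⟨x, hx, rfl, -⟩
      exact_mod_cast (ihj x hx).right
  | succ i ihi =>
    intro j
    induction j with
    | zero =>
      intro k hk
      simp only [pvCellA] at hk
      rw [mem_pvAddClipped] at hk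
      simp only [PySem.Set.empty, List.not_mem_nil, false_or] at hk
      rcases hk with ⟨x, hx, rfl, -⟩
      exact_mod_cast (ihi 0 x hx).down
    | succ j ihj =>
      intro k hk
      simp only [pvCellA] at hk
      rw [mem_pvAddClipped, mem_pvAddClipped] at hk
      simp only [PySem.Set.empty, List.not_mem_nil, false_or] at hk
      rcases hk with ⟨x, hx, rfl, -⟩ | ⟨x, hx, rfl, -⟩
      · exact_mod_cast (ihj x hx).right
      · exact_mod_cast (ihi (j + 1) x hx).down

lemma pvReach_mem_cellA (grid : List (List Int)) (s : Int) :
    ∀ i j : Nat, ∀ k : Int, pvReach grid i j k →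
      -(2 * s - ((i : Int) + j + 1)) ≤ k → k ≤ 2 * s - ((i : Int) + j + 1) →
      k ∈ pvCellA grid s i j := by
  intro i
  induction i with
  | zero =>
    intro j
    induction j with
    | zero =>
      intro k hk _ _
      cases hk
      simp [pvCellA, PySem.Set.empty]
    | succ j ihj =>
      intro k hk hlo hhi
      cases hk with
      | right hx =>
        rename_i x
        obtain ⟨hb1, hb2, -⟩ := pvReach_bounds hx
        have hc := pvC_cases grid ((0 : Nat) : Int) ((j + 1 : Nat) : Int)
        simp only [pvCellA]
        rw [mem_pvAddClipped]
        push_cast at hlo hhi hb1 hb2 hc ⊢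
        refine Or.inr ⟨x, ?_, by ring_nf, ?_⟩
        · apply ihj x hx <;> push_cast <;> omega
        · omega
  | succ i ihi =>
    intro j
    induction j with
    | zero =>
      intro k hk hlo hhi
      cases hk with
      | down hx =>
        rename_i x
        obtain ⟨hb1, hb2, -⟩ := pvReach_bounds hx
        have hc := pvC_cases grid ((i + 1 : Nat) : Int) ((0 : Nat) : Int)
        simp only [pvCellA]
        rw [mem_pvAddClipped]
        push_cast at hlo hhi hb1 hb2 hc ⊢
        refine Or.inr ⟨x, ?_, by ring_nf, ?_⟩
        · apply ihi 0 x hx <;> push_cast <;> omega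
        · omega
    | succ j ihj =>
      intro k hk hlo hhi
      cases hk with
      | right hx =>
        rename_i x
        obtain ⟨hb1, hb2, -⟩ := pvReach_bounds hx
        have hc := pvC_cases grid ((i + 1 : Nat) : Int) ((j + 1 : Nat) : Int)
        simp only [pvCellA]
        rw [mem_pvAddClipped, mem_pvAddClipped]
        push_cast at hlo hhi hb1 hb2 hc ⊢
        refine Or.inl (Or.inr ⟨x, ?_, by ring_nf, ?_⟩)
        · apply ihj x hx <;> push_cast <;> omega
        · omega
      | down hx =>
        rename_i x
        obtain ⟨hb1, hb2, -⟩ := pvReach_bounds hx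
        have hc := pvC_cases grid ((i + 1 : Nat) : Int) ((j + 1 : Nat) : Int)
        simp only [pvCellA]
        rw [mem_pvAddClipped]
        push_cast at hlo hhi hb1 hb2 hc ⊢
        refine Or.inr ⟨x, ?_, by ring_nf, ?_⟩
        · apply ihi (j + 1) x hx <;> push_cast <;> omega
        · omega

lemma pvOnes_cases (grid : List (List Int)) (i j : Int) :
    pvOnes grid i j = 0 ∨ pvOnes grid i j = 1 := by
  unfold pvOnes; split <;> simp

lemma pvReach_iff_interval (grid : List (List Int)) :
    ∀ i j : Nat, ∀ k : Int,
      pvReach grid i j k ↔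
        (2 * pvLoC grid i j - ((i : Int) + j + 1) ≤ k ∧
         k ≤ 2 * pvHiC grid i j - ((i : Int) + j + 1) ∧
         (2 : Int) ∣ (k + i + j + 1)) := by
  intro i
  induction i with
  | zero =>
    intro j
    induction j with
    | zero =>
      intro k
      have ho := pvOnes_cases grid 0 0
      have hc := pvC_eq_ones grid 0 0
      simp only [pvLoC, pvHiC]
      constructor
      · intro hk
        cases hk
        push_cast
        omega
      · intro ⟨h1, h2, h3⟩
        push_cast at h1 h2 h3
        have : k = pvC grid 0 0 := by omega
        exact this ▸ pvReach.base
    | succ j ihj =>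
      intro k
      have hc := pvC_eq_ones grid ((0 : Nat) : Int) ((j + 1 : Nat) : Int)
      have ho := pvOnes_cases grid ((0 : Nat) : Int) ((j + 1 : Nat) : Int)
      simp only [pvLoC, pvHiC]
      constructor
      · intro hk
        cases hk with
        | right hx =>
          rename_i x
          obtain ⟨h1, h2, h3⟩ := (ihj x).mp hx
          push_cast at *
          omega
      · intro ⟨h1, h2, h3⟩
        have hx : pvReach grid 0 j (k - pvC grid ((0 : Nat) : Int) ((j + 1 : Nat) : Int)) := by
          apply (ihj _).mpr
          push_cast at *
          omega
        have h := hx.right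
        rwa [Int.sub_add_cancel] at h
  | succ i ihi =>
    intro j
    induction j with
    | zero =>
      intro k
      have hc := pvC_eq_ones grid ((i + 1 : Nat) : Int) ((0 : Nat) : Int)
      have ho := pvOnes_cases grid ((i + 1 : Nat) : Int) ((0 : Nat) : Int)
      simp only [pvLoC, pvHiC]
      constructor
      · intro hk
        cases hk with
        | down hx =>
          rename_i x
          obtain ⟨h1, h2, h3⟩ := (ihi 0 x).mp hx
          push_cast at *
          omega
      · intro ⟨h1, h2, h3⟩
        have hx : pvReach grid i 0 (k - pvC grid ((i + 1 : Nat) : Int) ((0 : Nat) : Int)) := by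
          apply (ihi 0 _).mpr
          push_cast at *
          omega
        have h := hx.down
        rwa [Int.sub_add_cancel] at h
    | succ j ihj =>
      intro k
      have hc := pvC_eq_ones grid ((i + 1 : Nat) : Int) ((j + 1 : Nat) : Int)
      have ho := pvOnes_cases grid ((i + 1 : Nat) : Int) ((j + 1 : Nat) : Int)
      have hminc := min_choice (pvLoC grid i (j + 1)) (pvLoC grid (i + 1) j)
      have hmaxc := max_choice (pvHiC grid i (j + 1)) (pvHiC grid (i + 1) j)
      simp only [pvLoC, pvHiC]
      constructor
      · intro hk
        cases hk with
        | right hx =>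
          rename_i x
          obtain ⟨h1, h2, h3⟩ := (ihj x).mp hx
          push_cast at *
          omega
        | down hx =>
          rename_i x
          obtain ⟨h1, h2, h3⟩ := (ihi (j + 1) x).mp hx
          push_cast at *
          omega
      · intro ⟨h1, h2, h3⟩
        -- both neighbours contain a shift of a common value, so their intervals
        -- are at distance ≤ 2 and their union is one parity interval
        obtain ⟨x0, hx0⟩ := pvReach_nonempty grid i j
        obtain ⟨hp1, hp2, hp3⟩ := (ihi (j + 1) _).mp hx0.right
        obtain ⟨hq1, hq2, hq3⟩ := (ihj _).mp hx0.down
        have hc1 := pvC_cases grid ((i : Nat) : Int) ((j + 1 : Nat) : Int)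
        have hc2 := pvC_cases grid ((i + 1 : Nat) : Int) ((j : Nat) : Int)
        set c := pvC grid ((i + 1 : Nat) : Int) ((j + 1 : Nat) : Int) with hcdef
        have hsplit :
            (2 * pvLoC grid i (j + 1) - ((i : Int) + (j + 1) + 1) ≤ k - c ∧
             k - c ≤ 2 * pvHiC grid i (j + 1) - ((i : Int) + (j + 1) + 1) ∧
             (2 : Int) ∣ (k - c + i + (j + 1) + 1)) ∨
            (2 * pvLoC grid (i + 1) j - (((i + 1 : Nat) : Int) + j + 1) ≤ k - c ∧
             k - c ≤ 2 * pvHiC grid (i + 1) j - (((i + 1 : Nat) : Int) + j + 1) ∧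
             (2 : Int) ∣ (k - c + (i + 1) + j + 1)) := by
          push_cast at *
          omega
        rcases hsplit with h | h
        · have hx := pvReach.down ((ihi (j + 1) _).mpr h)
          rwa [Int.sub_add_cancel] at hx
        · have hx := pvReach.right ((ihj _).mpr h)
          rwa [Int.sub_add_cancel] at hx

-- ===== VERDICT (by name: the statement is the Claim_ definition above) =====
theorem isThereAPath2_spec : Claim_equal_isThereAPath2 := by
  intro grid _ hpre
  unfold Spec_isThereAPath2
  obtain ⟨hne, himp⟩ := hpre
  cases grid with
  | nil => exact absurd rfl hne
  | cons r0 rest =>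
    have h0 : PySem.List.pyGet? (r0 :: rest) (0 : Int) = some r0 := by
      simp [PySem.List.pyGet?, PySem.List.pyIdx?]
    set s0 : Int := (((r0 :: rest : List (List Int)).length : Int) + (r0.length : Int) - 1)
      with hs0
    have hb1 := PySem.Int.band_one s0
    by_cases hodd : PySem.Int.mod s0 2 = 1
    · have hA : isThereAPath2 (r0 :: rest) = false := by
        unfold isThereAPath2
        rw [h0]
        simp only
        rw [if_pos (by rw [hb1, hodd]; norm_num)]
      have hB : isThereAPath2_alt (r0 :: rest) = false := by
        unfold isThereAPath2_alt
        rw [h0]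
        simp only
        rw [if_pos hodd]
      rw [hA, hB]
    · have hmod0 : PySem.Int.mod s0 2 = 0 := by
        have hnn := PySem.Int.mod_nonneg s0 (show (0 : Int) < 2 by norm_num)
        have hlt := PySem.Int.mod_lt s0 (show (0 : Int) < 2 by norm_num)
        omega
      obtain ⟨hn, -⟩ := himp (by simpa using hmod0)
      simp only [List.headD_cons] at hn
      have hm : 0 < (r0 :: rest : List (List Int)).length := by simp
      have hseq : s0 >>> (1 : Nat) = PySem.Int.floordiv s0 2 := by
        rw [PySem.Int.floordiv_eq_ediv_of_pos (show (0 : Int) < 2 by norm_num),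
          Int.shiftRight_eq_div_pow]
        norm_num
      have h2s : 2 * (s0 >>> (1 : Nat)) = s0 := by
        rw [hseq]
        have := PySem.Int.floordiv_mul_add_mod s0 2
        omega
      rw [pvA_eval r0 rest (s0 >>> (1 : Nat)) hn (by rw [← hs0, hb1, hmod0]; norm_num) (by rw [hs0])]
      rw [pvB_eval r0 rest (PySem.Int.floordiv s0 2) hn (by rw [← hs0, hmod0]; norm_num) (by rw [hs0])]
      rw [← hseq]
      set s : Int := s0 >>> (1 : Nat) with hsdef
      set m : Nat := (r0 :: rest : List (List Int)).length with hmdef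
      set n : Nat := r0.length with hndef
      have hfin : (((m - 1 : Nat) : Int) + ((n - 1 : Nat) : Int) + 1) = 2 * s := by
        omega
      rw [Bool.eq_iff_iff, PySem.Set.contains_iff]
      simp only [Bool.and_eq_true, decide_eq_true_eq]
      constructor
      · intro hmem
        have hr := pvCellA_subset_reach (r0 :: rest) s (m - 1) (n - 1) 0 hmem
        obtain ⟨h1, h2, -⟩ := (pvReach_iff_interval (r0 :: rest) (m - 1) (n - 1) 0).mp hr
        constructor <;> omega
      · rintro ⟨hlo, hhi⟩
        apply pvReach_mem_cellA (r0 :: rest) s (m - 1) (n - 1) 0 ?_ (by omega) (by omega)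
        apply (pvReach_iff_interval (r0 :: rest) (m - 1) (n - 1) 0).mpr
        refine ⟨by omega, by omega, by omega⟩
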